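-- pv_equiv track=rewrite | github.com/tanoymajumdar/Python-Search | nqueen.py | moveOne
-- ===== SOURCE A (Python) =====
-- def countAttack(queen):
--     count = 0
--     for row1 in range( 0, len(queen) ):
--         for row2 in range( row1 + 1, len( queen ) ):
--             if queen[row1] == queen[row2]:
--                 count += 1
--             elif abs(queen[row1] - queen[row2]) == (row2 - row1):
--                 count += 1
--     return count
--
-- def moveOne(queen):
--     q=list(queen)
--     num=0
--     minm=1000
--     minp=0
--     i=0
--     while (i<len(q)):
--         r=[]
--         q=list(q)
--         a=q[i]
--         j=len(q)-1
--         while (j>=0):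
--             if q[i]!=j:
--                 q[i]=j
--                 t=countAttack(tuple(q))
--                 if (t<minm):
--                     minm=t
--                     minp=j
--                     num=i
--                 q[i]=a
--             j=j-1
--         i=i+1
--     q[num]=minp
--     return(tuple(q))
-- ===== SOURCE B (Python) =====
-- def moveOne(queen):
--     q = list(queen)
--     n = len(q)
--     # base attack count among all rows, computed once
--     base = 0
--     for r1 in range(n):
--         for r2 in range(r1 + 1, n):
--             if q[r1] == q[r2] or abs(q[r1] - q[r2]) == r2 - r1:
--                 base += 1
--
--     def contrib(i, v):
--         # attacking pairs between row i holding value v and every other row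
--         c = 0
--         for r in range(n):
--             if r != i and (q[r] == v or abs(q[r] - v) == abs(r - i)):
--                 c += 1
--         return c
--
--     minm = 1000
--     minp = 0
--     num = 0
--     for i in range(n):
--         rest = base - contrib(i, q[i])
--         for j in range(n - 1, -1, -1):
--             if j != q[i]:
--                 t = rest + contrib(i, j)
--                 if t < minm:
--                     minm = t
--                     minp = j
--                     num = i
--     q[num] = minp
--     return tuple(q)
-- ===== Notes on version B (the rewrite author's own statement) =====
-- stated objective: faster
-- what changed: B computes the board's attack count once and scores each candidate move by an O(n) delta (subtract the moved queen's old row/diagonal contribution, add the new one) instead of recounting all pairs for every candidate, O(n^3) instead of O(n^4).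
import Mathlib
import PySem

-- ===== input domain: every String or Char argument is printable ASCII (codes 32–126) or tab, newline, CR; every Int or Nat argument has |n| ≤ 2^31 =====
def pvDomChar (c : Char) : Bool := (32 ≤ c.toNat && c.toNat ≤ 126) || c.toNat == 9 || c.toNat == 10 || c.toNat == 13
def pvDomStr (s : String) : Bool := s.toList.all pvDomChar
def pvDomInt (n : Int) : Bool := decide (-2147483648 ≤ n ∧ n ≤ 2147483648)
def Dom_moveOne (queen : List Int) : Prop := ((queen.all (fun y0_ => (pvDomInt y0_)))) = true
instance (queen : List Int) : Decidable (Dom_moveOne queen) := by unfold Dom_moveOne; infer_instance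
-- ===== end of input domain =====

-- B scores each candidate move by an O(n) delta against a once-computed base attack count instead of
-- recounting all pairs per candidate (O(n^3) vs O(n^4)); equivalence is about the return value only.

-- ===== PORT A =====
def countAttack (queen : List Int) : Int :=
  (PySem.List.pyRange 0 (queen.length : Int) 1).foldl (fun count row1 =>
    (PySem.List.pyRange (row1 + 1) (queen.length : Int) 1).foldl (fun count row2 =>
      if PySem.List.pyGetD queen row1 0 = PySem.List.pyGetD queen row2 0 then count + 1
      else if |PySem.List.pyGetD queen row1 0 - PySem.List.pyGetD queen row2 0| = row2 - row1 then count + 1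
      else count) count) 0

def moveOne (queen : List Int) : List Int :=
  let q := queen
  let st := (PySem.List.pyRange 0 (q.length : Int) 1).foldl (fun (st : Int × Int × Int) i =>
      let a := PySem.List.pyGetD q i 0
      (PySem.List.pyRange ((q.length : Int) - 1) (-1) (-1)).foldl (fun (st : Int × Int × Int) j =>
        if a ≠ j then
          let t := countAttack (PySem.List.pySetD q i j)
          if t < st.2.1 then (i, t, j) else st
        else st) st) (0, 1000, 0)
  PySem.List.pySetD q st.1 st.2.2

-- ===== PORT B =====
def contribNQ (q : List Int) (n : Int) (i : Int) (v : Int) : Int :=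
  (PySem.List.pyRange 0 n 1).foldl (fun c r =>
    if r ≠ i ∧ (PySem.List.pyGetD q r 0 = v ∨ |PySem.List.pyGetD q r 0 - v| = |r - i|) then c + 1 else c) 0

def moveOne_alt (queen : List Int) : List Int :=
  let q := queen
  let n : Int := q.length
  let base := (PySem.List.pyRange 0 n 1).foldl (fun b r1 =>
      (PySem.List.pyRange (r1 + 1) n 1).foldl (fun b r2 =>
        if PySem.List.pyGetD q r1 0 = PySem.List.pyGetD q r2 0 ∨ |PySem.List.pyGetD q r1 0 - PySem.List.pyGetD q r2 0| = r2 - r1 then b + 1 else b) b) 0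
  let st := (PySem.List.pyRange 0 n 1).foldl (fun (st : Int × Int × Int) i =>
      let rest := base - contribNQ q n i (PySem.List.pyGetD q i 0)
      (PySem.List.pyRange (n - 1) (-1) (-1)).foldl (fun (st : Int × Int × Int) j =>
        if j ≠ PySem.List.pyGetD q i 0 then
          let t := rest + contribNQ q n i j
          if t < st.2.1 then (i, t, j) else st
        else st) st) (0, 1000, 0)
  PySem.List.pySetD q st.1 st.2.2

-- ===== PRECONDITION & SPEC =====
-- Pre_ excludes only the empty list, on which Python's final q[num] = minp raises IndexError.
def Pre_moveOne (queen : List Int) : Prop := queen ≠ []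
instance (queen : List Int) : Decidable (Pre_moveOne queen) := by unfold Pre_moveOne; infer_instance
def pvWitness_moveOne : List Int := [1, 3, 0]

def Spec_moveOne (queen : List Int) (out : List Int) : Prop := out = moveOne_alt queen
instance (queen : List Int) (out : List Int) : Decidable (Spec_moveOne queen out) := by unfold Spec_moveOne; infer_instance

-- ===== CLAIM (what is proved, stated in full; the proofs are below) =====
def Claim_equal_moveOne : Prop := ∀ (queen : List Int), Dom_moveOne queen → Pre_moveOne queen → Spec_moveOne queen (moveOne queen)

-- ===== LEMMAS AND PROOFS =====

-- number of attacking pairs (r1 < r2) of the board q, as a double sum over all rows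
def pvS (q : List Int) : Int :=
  ((PySem.List.pyRange 0 (q.length : Int) 1).map (fun r1 =>
    ((PySem.List.pyRange 0 (q.length : Int) 1).map (fun r2 =>
      if r1 < r2 ∧ (PySem.List.pyGetD q r1 0 = PySem.List.pyGetD q r2 0 ∨
          |PySem.List.pyGetD q r1 0 - PySem.List.pyGetD q r2 0| = |r1 - r2|) then (1 : Int) else 0)).sum)).sum

-- attacking pairs between a queen placed at row i with value v and the other rows of q
def pvC (q : List Int) (i v : Int) : Int :=
  ((PySem.List.pyRange 0 (q.length : Int) 1).map (fun r =>
    if r ≠ i ∧ (PySem.List.pyGetD q r 0 = v ∨ |PySem.List.pyGetD q r 0 - v| = |r - i|) then (1 : Int) else 0)).sum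

-- attacking pairs among rows other than i
def pvD (q : List Int) (i : Int) : Int :=
  ((PySem.List.pyRange 0 (q.length : Int) 1).map (fun r1 =>
    ((PySem.List.pyRange 0 (q.length : Int) 1).map (fun r2 =>
      if r1 < r2 ∧ r1 ≠ i ∧ r2 ≠ i ∧ (PySem.List.pyGetD q r1 0 = PySem.List.pyGetD q r2 0 ∨
          |PySem.List.pyGetD q r1 0 - PySem.List.pyGetD q r2 0| = |r1 - r2|) then (1 : Int) else 0)).sum)).sum

theorem pvGetSet (q : List Int) (i v r d : Int) (h0 : 0 ≤ i) (h1 : i < (q.length : Int)) (hr : 0 ≤ r) :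
    PySem.List.pyGetD (PySem.List.pySetD q i v) r d = if r = i then v else PySem.List.pyGetD q r d := by
  obtain ⟨a, rfl⟩ : ∃ a : ℕ, i = (a : Int) := ⟨i.toNat, (Int.toNat_of_nonneg h0).symm⟩
  obtain ⟨b, rfl⟩ : ∃ b : ℕ, r = (b : Int) := ⟨r.toNat, (Int.toNat_of_nonneg hr).symm⟩
  rw [PySem.List.pyGetD_pySetD_natCast q a b v d (by exact_mod_cast h1)]
  simp [Nat.cast_inj]

theorem pvSumIte (l : List Int) (hl : l.Nodup) (i : Int) (hi : i ∈ l) (K : Int) :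
    (l.map (fun x => if x = i then K else 0)).sum = K := by
  induction l with
  | nil => cases hi
  | cons a t ih =>
    simp only [List.map_cons, List.sum_cons]
    rcases List.mem_cons.mp hi with h | h
    · subst h
      rw [if_pos rfl, List.map_congr_left (fun x hx => if_neg (by rintro rfl; exact (List.nodup_cons.mp hl).1 hx))]
      simp
    · rw [if_neg (by rintro rfl; exact (List.nodup_cons.mp hl).1 h), ih (List.nodup_cons.mp hl).2 h]
      ring

theorem pvSumSplit (f : Int → Int) (a m b : Int) (h1 : a ≤ m) (h2 : m ≤ b)
    (hz : ∀ x, a ≤ x → x < m → f x = 0) :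
    ((PySem.List.pyRange a b 1).map f).sum = ((PySem.List.pyRange m b 1).map f).sum := by
  rw [PySem.List.pyRange_one_append a m b h1 h2, List.map_append, List.sum_append,
    List.sum_eq_zero, zero_add]
  intro x hx
  obtain ⟨y, hy, rfl⟩ := List.mem_map.mp hx
  obtain ⟨hya, hyb⟩ := PySem.List.mem_pyRange_one.mp hy
  exact hz y hya hyb

theorem countAttack_eq (q : List Int) : countAttack q = pvS q := by
  unfold countAttack pvS
  refine (PySem.List.foldl_congr_mem' _ _
      (fun (count : Int) r1 => count +
        ((PySem.List.pyRange 0 (q.length : Int) 1).map (fun r2 =>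
          if r1 < r2 ∧ (PySem.List.pyGetD q r1 0 = PySem.List.pyGetD q r2 0 ∨
              |PySem.List.pyGetD q r1 0 - PySem.List.pyGetD q r2 0| = |r1 - r2|) then (1 : Int) else 0)).sum)
      _ ?_).trans ?_
  · intro r1 hr1 count
    obtain ⟨hr1a, hr1b⟩ := PySem.List.mem_pyRange_one.mp hr1
    refine (PySem.List.foldl_congr_mem' _ _
        (fun (c : Int) r2 => if r1 < r2 ∧ (PySem.List.pyGetD q r1 0 = PySem.List.pyGetD q r2 0 ∨
            |PySem.List.pyGetD q r1 0 - PySem.List.pyGetD q r2 0| = |r1 - r2|) then c + 1 else c)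
        _ ?_).trans ?_
    · intro r2 hr2 c
      obtain ⟨hr2a, hr2b⟩ := PySem.List.mem_pyRange_one.mp hr2
      have habs : |r1 - r2| = r2 - r1 := by rw [abs_sub_comm]; exact abs_of_nonneg (by omega)
      have hlt : r1 < r2 := by omega
      by_cases hx : PySem.List.pyGetD q r1 0 = PySem.List.pyGetD q r2 0
      · simp [hx, hlt]
      · simp [hx, hlt, habs]
    · rw [PySem.List.foldl_ite_add_one, ← PySem.List.sum_map_ite_one_zero]
      simp only [decide_eq_true_eq]
      congr 1
      rw [pvSumSplit _ 0 (r1 + 1) (q.length : Int) (by omega) (by omega)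
        (fun x hxa hxb => if_neg (by rintro ⟨hc, _⟩; omega))]
  · rw [PySem.List.foldl_add, zero_add]

theorem altBase_eq (q : List Int) :
    ((PySem.List.pyRange 0 (q.length : Int) 1).foldl (fun b r1 =>
      (PySem.List.pyRange (r1 + 1) (q.length : Int) 1).foldl (fun b r2 =>
        if PySem.List.pyGetD q r1 0 = PySem.List.pyGetD q r2 0 ∨ |PySem.List.pyGetD q r1 0 - PySem.List.pyGetD q r2 0| = r2 - r1 then b + 1 else b) b) 0) = pvS q := by
  unfold pvS
  refine (PySem.List.foldl_congr_mem' _ _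
      (fun (count : Int) r1 => count +
        ((PySem.List.pyRange 0 (q.length : Int) 1).map (fun r2 =>
          if r1 < r2 ∧ (PySem.List.pyGetD q r1 0 = PySem.List.pyGetD q r2 0 ∨
              |PySem.List.pyGetD q r1 0 - PySem.List.pyGetD q r2 0| = |r1 - r2|) then (1 : Int) else 0)).sum)
      _ ?_).trans ?_
  · intro r1 hr1 count
    obtain ⟨hr1a, hr1b⟩ := PySem.List.mem_pyRange_one.mp hr1
    refine (PySem.List.foldl_congr_mem' _ _
        (fun (c : Int) r2 => if r1 < r2 ∧ (PySem.List.pyGetD q r1 0 = PySem.List.pyGetD q r2 0 ∨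
            |PySem.List.pyGetD q r1 0 - PySem.List.pyGetD q r2 0| = |r1 - r2|) then c + 1 else c)
        _ ?_).trans ?_
    · intro r2 hr2 c
      obtain ⟨hr2a, hr2b⟩ := PySem.List.mem_pyRange_one.mp hr2
      have habs : |r1 - r2| = r2 - r1 := by rw [abs_sub_comm]; exact abs_of_nonneg (by omega)
      have hlt : r1 < r2 := by omega
      simp [hlt, habs]
    · rw [PySem.List.foldl_ite_add_one, ← PySem.List.sum_map_ite_one_zero]
      simp only [decide_eq_true_eq]
      congr 1
      rw [pvSumSplit _ 0 (r1 + 1) (q.length : Int) (by omega) (by omega)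
        (fun x hxa hxb => if_neg (by rintro ⟨hc, _⟩; omega))]
  · rw [PySem.List.foldl_add, zero_add]

theorem contrib_eq (q : List Int) (i v : Int) : contribNQ q (q.length : Int) i v = pvC q i v := by
  unfold contribNQ pvC
  rw [PySem.List.foldl_ite_add_one, ← PySem.List.sum_map_ite_one_zero]
  simp

theorem pvKey (q : List Int) (i v : Int) (h0 : 0 ≤ i) (h1 : i < (q.length : Int)) :
    pvS (PySem.List.pySetD q i v) = pvD q i + pvC q i v := by
  have hnd := PySem.List.nodup_pyRange_one 0 (q.length : Int)
  have hiR : i ∈ PySem.List.pyRange 0 (q.length : Int) 1 := PySem.List.mem_pyRange_one.mpr ⟨h0, h1⟩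
  unfold pvS pvD pvC
  simp only [PySem.List.length_pySetD]
  have e : ∀ r1 ∈ PySem.List.pyRange 0 (q.length : Int) 1,
      ((PySem.List.pyRange 0 (q.length : Int) 1).map (fun r2 =>
        if r1 < r2 ∧ (PySem.List.pyGetD (PySem.List.pySetD q i v) r1 0 = PySem.List.pyGetD (PySem.List.pySetD q i v) r2 0 ∨
            |PySem.List.pyGetD (PySem.List.pySetD q i v) r1 0 - PySem.List.pyGetD (PySem.List.pySetD q i v) r2 0| = |r1 - r2|) then (1 : Int) else 0)).sum
      = ((PySem.List.pyRange 0 (q.length : Int) 1).map (fun r2 =>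
          if r1 < r2 ∧ r1 ≠ i ∧ r2 ≠ i ∧ (PySem.List.pyGetD q r1 0 = PySem.List.pyGetD q r2 0 ∨
              |PySem.List.pyGetD q r1 0 - PySem.List.pyGetD q r2 0| = |r1 - r2|) then (1 : Int) else 0)).sum
        + ((if r1 = i then ((PySem.List.pyRange 0 (q.length : Int) 1).map (fun r =>
              if i < r ∧ (v = PySem.List.pyGetD q r 0 ∨ |v - PySem.List.pyGetD q r 0| = |i - r|) then (1 : Int) else 0)).sum else 0)
          + (if r1 < i ∧ (PySem.List.pyGetD q r1 0 = v ∨ |PySem.List.pyGetD q r1 0 - v| = |r1 - i|) then (1 : Int) else 0)) := by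
    intro r1 hr1
    obtain ⟨hr1a, hr1b⟩ := PySem.List.mem_pyRange_one.mp hr1
    have e2 : ∀ r2 ∈ PySem.List.pyRange 0 (q.length : Int) 1,
        (if r1 < r2 ∧ (PySem.List.pyGetD (PySem.List.pySetD q i v) r1 0 = PySem.List.pyGetD (PySem.List.pySetD q i v) r2 0 ∨
            |PySem.List.pyGetD (PySem.List.pySetD q i v) r1 0 - PySem.List.pyGetD (PySem.List.pySetD q i v) r2 0| = |r1 - r2|) then (1 : Int) else 0)
        = (if r1 < r2 ∧ r1 ≠ i ∧ r2 ≠ i ∧ (PySem.List.pyGetD q r1 0 = PySem.List.pyGetD q r2 0 ∨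
              |PySem.List.pyGetD q r1 0 - PySem.List.pyGetD q r2 0| = |r1 - r2|) then (1 : Int) else 0)
          + ((if r1 = i then (if i < r2 ∧ (v = PySem.List.pyGetD q r2 0 ∨ |v - PySem.List.pyGetD q r2 0| = |i - r2|) then (1 : Int) else 0) else 0)
            + (if r2 = i then (if r1 < i ∧ (PySem.List.pyGetD q r1 0 = v ∨ |PySem.List.pyGetD q r1 0 - v| = |r1 - i|) then (1 : Int) else 0) else 0)) := by
      intro r2 hr2
      obtain ⟨hr2a, hr2b⟩ := PySem.List.mem_pyRange_one.mp hr2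
      simp only [pvGetSet q i v r1 0 h0 h1 hr1a, pvGetSet q i v r2 0 h0 h1 hr2a]
      by_cases e1 : r1 = i <;> by_cases e2 : r2 = i <;> simp [e1, e2]
    rw [List.map_congr_left e2, PySem.List.sum_map_add_int, PySem.List.sum_map_add_int,
      pvSumIte _ hnd i hiR _]
    by_cases hri : r1 = i
    · subst hri; simp
    · simp [hri]
  rw [List.map_congr_left e, PySem.List.sum_map_add_int, PySem.List.sum_map_add_int,
    pvSumIte _ hnd i hiR _]
  congr 1
  rw [← PySem.List.sum_map_add_int]
  refine congrArg List.sum (List.map_congr_left ?_)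
  intro r hr
  have hsym2 : |v - PySem.List.pyGetD q r 0| = |PySem.List.pyGetD q r 0 - v| := abs_sub_comm _ _
  have hsym3 : |i - r| = |r - i| := abs_sub_comm _ _
  rcases lt_trichotomy r i with h | h | h
  · simp [show ¬ i < r by omega, ne_of_lt h, h]
  · simp [h]
  · simp [show ¬ r < i by omega, ne_of_gt h, h, eq_comm, hsym2, hsym3]

theorem pvSet_self (q : List Int) (i : Int) (h0 : 0 ≤ i) (h1 : i < (q.length : Int)) :
    PySem.List.pySetD q i (PySem.List.pyGetD q i 0) = q := by
  rw [PySem.List.pyGetD_eq_getElem q 0 h0 h1, PySem.List.pySetD_of_nonneg q _ h0]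
  refine List.ext_getElem (by simp) ?_
  intro m hm1 hm2
  rw [List.getElem_set]
  split
  · rename_i hm; subst hm; rfl
  · rfl

theorem pvMove (q : List Int) (i j : Int) (h0 : 0 ≤ i) (h1 : i < (q.length : Int)) :
    countAttack (PySem.List.pySetD q i j) = pvS q - pvC q i (PySem.List.pyGetD q i 0) + pvC q i j := by
  rw [countAttack_eq, pvKey q i j h0 h1]
  have k2 := pvKey q i (PySem.List.pyGetD q i 0) h0 h1
  rw [pvSet_self q i h0 h1] at k2
  linarith

theorem pvMain (queen : List Int) : moveOne queen = moveOne_alt queen := by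
  simp only [moveOne, moveOne_alt]
  refine congrArg (fun st : Int × Int × Int => PySem.List.pySetD queen st.1 st.2.2) ?_
  apply PySem.List.foldl_congr_mem'
  intro i hi st
  obtain ⟨h0, h1⟩ := PySem.List.mem_pyRange_one.mp hi
  apply PySem.List.foldl_congr_mem'
  intro j hj st'
  simp only [altBase_eq, contrib_eq, pvMove queen i j h0 h1]
  exact if_congr ne_comm rfl rfl

-- ===== VERDICT (by name: the statement is the Claim_ definition above) =====
theorem moveOne_spec : Claim_equal_moveOne := by
  intro queen _ _
  unfold Spec_moveOne
  exact pvMain queen
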